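-- pv_equiv track=rewrite | github.com/SmileyChris/django-includecontents | showcase/registry.py | _guess_token_category
-- ===== SOURCE A (Python) =====
-- def _guess_token_category(path: str, token_type: str) -> str:
--     """Guess the token category based on path and type."""
--     path_lower = path.lower()
--
--     if "color" in path_lower or token_type == "color":
--         return "colors"
--     elif any(word in path_lower for word in ["font", "text", "typography"]) or token_type in ["fontFamily", "fontWeight", "fontSize"]:
--         return "typography"
--     elif any(word in path_lower for word in ["spacing", "space", "gap", "margin", "padding"]) or token_type == "dimension":
--         return "spacing"
--     elif any(word in path_lower for word in ["border", "radius"]):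
--         return "borders"
--     elif any(word in path_lower for word in ["shadow", "elevation"]):
--         return "shadows"
--
--     return "miscellaneous"
-- ===== SOURCE B (Python) =====
-- # Aggregate-then-select: collect the priorities of ALL matching keywords/types
-- # and return the category of the minimum priority (no ordered early-return chain).
-- KEYWORD_PRIORITY = {
--     "color": 0,
--     "font": 1, "text": 1, "typography": 1,
--     "spacing": 2, "space": 2, "gap": 2, "margin": 2, "padding": 2,
--     "border": 3, "radius": 3,
--     "shadow": 4, "elevation": 4,
-- }
-- TYPE_PRIORITY = {
--     "color": 0,
--     "fontFamily": 1, "fontWeight": 1, "fontSize": 1,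
--     "dimension": 2,
-- }
-- CATEGORIES = ["colors", "typography", "spacing", "borders", "shadows"]
--
--
-- def _guess_token_category(path: str, token_type: str) -> str:
--     """Guess the token category based on path and type."""
--     path_lower = path.lower()
--     candidates = [p for word, p in KEYWORD_PRIORITY.items() if word in path_lower]
--     type_priority = TYPE_PRIORITY.get(token_type)
--     if type_priority is not None:
--         candidates.append(type_priority)
--     if not candidates:
--         return "miscellaneous"
--     return CATEGORIES[min(candidates)]
-- ===== Notes on version B (the rewrite author's own statement) =====
-- stated objective: alternative
-- what changed: Instead of an ordered if/elif chain with early return, B collects the priorities of all matching keywords and the token type via priority maps and returns the category of the minimum priority.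
import Mathlib
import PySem

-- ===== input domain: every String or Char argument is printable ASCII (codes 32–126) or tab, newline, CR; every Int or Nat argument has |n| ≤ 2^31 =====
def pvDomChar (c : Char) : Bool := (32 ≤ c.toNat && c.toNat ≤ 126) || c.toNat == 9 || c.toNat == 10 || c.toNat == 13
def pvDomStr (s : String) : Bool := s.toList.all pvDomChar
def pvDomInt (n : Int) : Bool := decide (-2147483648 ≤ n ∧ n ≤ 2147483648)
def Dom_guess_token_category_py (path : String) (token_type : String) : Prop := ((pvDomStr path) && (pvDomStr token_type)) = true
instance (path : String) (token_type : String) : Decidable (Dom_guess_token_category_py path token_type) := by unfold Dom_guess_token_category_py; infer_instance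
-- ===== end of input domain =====

-- B replaces A's ordered early-return chain by aggregate-then-select: it collects the
-- priorities of all matching keywords/the token type and returns the minimum-priority category.
-- ===== PORT A =====
def guess_token_category_py (path : String) (token_type : String) : String :=
  let path_lower := PySem.Str.lower path
  if PySem.Str.isIn "color" path_lower || token_type == "color" then "colors"
  else if ["font", "text", "typography"].any (fun word => PySem.Str.isIn word path_lower)
       || ["fontFamily", "fontWeight", "fontSize"].contains token_type then "typography"
  else if ["spacing", "space", "gap", "margin", "padding"].any (fun word => PySem.Str.isIn word path_lower)
       || token_type == "dimension" then "spacing"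
  else if ["border", "radius"].any (fun word => PySem.Str.isIn word path_lower) then "borders"
  else if ["shadow", "elevation"].any (fun word => PySem.Str.isIn word path_lower) then "shadows"
  else "miscellaneous"

-- ===== PORT B =====
def pvKeywordPriority : List (String × Nat) :=
  [("color", 0),
   ("font", 1), ("text", 1), ("typography", 1),
   ("spacing", 2), ("space", 2), ("gap", 2), ("margin", 2), ("padding", 2),
   ("border", 3), ("radius", 3),
   ("shadow", 4), ("elevation", 4)]

def pvTypePriority : List (String × Nat) :=
  [("color", 0), ("fontFamily", 1), ("fontWeight", 1), ("fontSize", 1), ("dimension", 2)]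

def pvCategories : List String := ["colors", "typography", "spacing", "borders", "shadows"]

def guess_token_category_py_alt (path : String) (token_type : String) : String :=
  let path_lower := PySem.Str.lower path
  let candidates :=
    (pvKeywordPriority.filter (fun wp => PySem.Str.isIn wp.1 path_lower)).map Prod.snd
  let candidates :=
    match pvTypePriority.lookup token_type with
    | some p => candidates ++ [p]
    | none => candidates
  match candidates.min? with
  | none => "miscellaneous"
  | some p => pvCategories.getD p "miscellaneous"

-- ===== PRECONDITION & SPEC =====
def Spec_guess_token_category_py (path : String) (token_type : String) (out : String) : Prop := out = guess_token_category_py_alt path token_type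
instance (path : String) (token_type : String) (out : String) : Decidable (Spec_guess_token_category_py path token_type out) := by unfold Spec_guess_token_category_py; infer_instance

-- ===== CLAIM =====
def Claim_equal_guess_token_category_py : Prop := ∀ (path : String) (token_type : String), Dom_guess_token_category_py path token_type → Spec_guess_token_category_py path token_type (guess_token_category_py path token_type)

-- ===== LEMMAS AND PROOFS =====
-- Abstractions of the two ports over the Boolean atoms (13 keyword substring tests k0..k12,
-- 5 token-type equality tests t0..t4).
def pvAexpr (k0 k1 k2 k3 k4 k5 k6 k7 k8 k9 k10 k11 k12 t0 t1 t2 t3 t4 : Bool) : String :=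
  if k0 || t0 then "colors"
  else if (k1 || (k2 || (k3 || false))) || (t1 || (t2 || (t3 || false))) then "typography"
  else if (k4 || (k5 || (k6 || (k7 || (k8 || false))))) || t4 then "spacing"
  else if k9 || (k10 || false) then "borders"
  else if k11 || (k12 || false) then "shadows"
  else "miscellaneous"

def pvMapped (k0 k1 k2 k3 k4 k5 k6 k7 k8 k9 k10 k11 k12 : Bool) : List Nat :=
  (([(k0,(0:Nat)),(k1,1),(k2,1),(k3,1),(k4,2),(k5,2),(k6,2),(k7,2),(k8,2),
     (k9,3),(k10,3),(k11,4),(k12,4)].filter (fun p => p.1)).map Prod.snd)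

def pvBexpr (k0 k1 k2 k3 k4 k5 k6 k7 k8 k9 k10 k11 k12 t0 t1 t2 t3 t4 : Bool) : String :=
  let candidates := pvMapped k0 k1 k2 k3 k4 k5 k6 k7 k8 k9 k10 k11 k12
  let t : Option Nat :=
    match t0 with
    | true => some 0
    | false => match t1 with
      | true => some 1
      | false => match t2 with
        | true => some 1
        | false => match t3 with
          | true => some 1
          | false => match t4 with
            | true => some 2
            | false => none
  let candidates := match t with | some p => candidates ++ [p] | none => candidates
  match candidates.min? with
  | none => "miscellaneous"
  | some p => pvCategories.getD p "miscellaneous"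

theorem filter_map_eq (pl : String) (l : List (String × Nat)) :
    (l.filter (fun wp => PySem.Str.isIn wp.1 pl)).map Prod.snd
      = ((l.map (fun wp => (PySem.Str.isIn wp.1 pl, wp.2))).filter (fun p => p.1)).map Prod.snd := by
  induction l with
  | nil => rfl
  | cons a as ih =>
    cases h : PySem.Str.isIn a.1 pl <;>
      (simp only [PySem.Str.isIn] at h ih; simp [List.filter_cons, List.map_cons, h, ih])

theorem pvA_eq (path token_type : String) :
    guess_token_category_py path token_type =
      pvAexpr (PySem.Str.isIn "color" (PySem.Str.lower path))
        (PySem.Str.isIn "font" (PySem.Str.lower path))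
        (PySem.Str.isIn "text" (PySem.Str.lower path))
        (PySem.Str.isIn "typography" (PySem.Str.lower path))
        (PySem.Str.isIn "spacing" (PySem.Str.lower path))
        (PySem.Str.isIn "space" (PySem.Str.lower path))
        (PySem.Str.isIn "gap" (PySem.Str.lower path))
        (PySem.Str.isIn "margin" (PySem.Str.lower path))
        (PySem.Str.isIn "padding" (PySem.Str.lower path))
        (PySem.Str.isIn "border" (PySem.Str.lower path))
        (PySem.Str.isIn "radius" (PySem.Str.lower path))
        (PySem.Str.isIn "shadow" (PySem.Str.lower path))
        (PySem.Str.isIn "elevation" (PySem.Str.lower path))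
        (token_type == "color") (token_type == "fontFamily") (token_type == "fontWeight")
        (token_type == "fontSize") (token_type == "dimension") := by rfl

theorem pvB_eq (path token_type : String) :
    guess_token_category_py_alt path token_type =
      pvBexpr (PySem.Str.isIn "color" (PySem.Str.lower path))
        (PySem.Str.isIn "font" (PySem.Str.lower path))
        (PySem.Str.isIn "text" (PySem.Str.lower path))
        (PySem.Str.isIn "typography" (PySem.Str.lower path))
        (PySem.Str.isIn "spacing" (PySem.Str.lower path))
        (PySem.Str.isIn "space" (PySem.Str.lower path))
        (PySem.Str.isIn "gap" (PySem.Str.lower path))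
        (PySem.Str.isIn "margin" (PySem.Str.lower path))
        (PySem.Str.isIn "padding" (PySem.Str.lower path))
        (PySem.Str.isIn "border" (PySem.Str.lower path))
        (PySem.Str.isIn "radius" (PySem.Str.lower path))
        (PySem.Str.isIn "shadow" (PySem.Str.lower path))
        (PySem.Str.isIn "elevation" (PySem.Str.lower path))
        (token_type == "color") (token_type == "fontFamily") (token_type == "fontWeight")
        (token_type == "fontSize") (token_type == "dimension") := by
  simp only [guess_token_category_py_alt, pvBexpr, pvMapped, filter_map_eq,
    pvKeywordPriority, pvTypePriority, List.map_cons, List.map_nil,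
    List.lookup_cons, List.lookup_nil]
  rfl

theorem pvMin_append_singleton (l : List Nat) (p : Nat) :
    (l ++ [p]).min? = some ((l.min?).elim p (fun m => min m p)) := by
  cases l with
  | nil => simp
  | cons a as => simp [List.min?, List.foldl_append]

set_option maxHeartbeats 2000000 in
theorem pvMapped_min (k0 k1 k2 k3 k4 k5 k6 k7 k8 k9 k10 k11 k12 : Bool) :
    (pvMapped k0 k1 k2 k3 k4 k5 k6 k7 k8 k9 k10 k11 k12).min? =
      (if k0 then some 0
       else if (k1 || (k2 || (k3 || false))) then some 1
       else if (k4 || (k5 || (k6 || (k7 || (k8 || false))))) then some 2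
       else if k9 || (k10 || false) then some 3
       else if k11 || (k12 || false) then some 4
       else none) := by
  revert k0 k1 k2 k3 k4 k5 k6 k7 k8 k9 k10 k11 k12
  decide

set_option maxHeartbeats 2000000 in
theorem pvExpr_eq (k0 k1 k2 k3 k4 k5 k6 k7 k8 k9 k10 k11 k12 t0 t1 t2 t3 t4 : Bool) :
    pvAexpr k0 k1 k2 k3 k4 k5 k6 k7 k8 k9 k10 k11 k12 t0 t1 t2 t3 t4 =
    pvBexpr k0 k1 k2 k3 k4 k5 k6 k7 k8 k9 k10 k11 k12 t0 t1 t2 t3 t4 := by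
  unfold pvAexpr pvBexpr
  cases t0 <;> cases t1 <;> cases t2 <;> cases t3 <;> cases t4 <;>
    simp only [if_true, Bool.or_true, Bool.or_false,
      pvMin_append_singleton, pvMapped_min] <;>
    (revert k0 k1 k2 k3 k4 k5 k6 k7 k8 k9 k10 k11 k12; decide)

-- ===== VERDICT =====
theorem guess_token_category_py_spec : Claim_equal_guess_token_category_py := by
  intro path token_type _
  unfold Spec_guess_token_category_py
  rw [pvA_eq, pvB_eq]
  exact pvExpr_eq _ _ _ _ _ _ _ _ _ _ _ _ _ _ _ _ _ _
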